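-- pv_equiv track=rewrite | github.com/K-WeiMing/nltk_helpers | src/extract_constituents.py | get_constituents
-- ===== SOURCE A (Python) =====
-- def get_constituents(sentence: str, brackets: str = "()") -> list:
--     """
--     Uses a sliding window to extract the constituents of a sentence in treebank format.
--     """
--     constituency = []
--     sentence_len = len(sentence)
--
--     for i in range(sentence_len):
--         # If match the first bracket, move onto the next char
--         if sentence[i] == brackets[0]:
--
--             for j in range(i + 1, sentence_len):
--                 # Check for start of the string if it matches another open bracket
--                 if sentence[j] == brackets[0]:
--                     # Append the constituent to the list
--                     constituency.append(sentence[i + 1 : j - 1])  # Remove extra space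
--                     break
--
--                 if sentence[j] == brackets[1]:
--                     break
--     return constituency
-- ===== SOURCE B (Python) =====
-- def get_constituents(sentence: str, brackets: str = "()") -> list:
--     """
--     Single left-to-right pass: remember the index of the last open bracket that
--     has not been followed by any bracket character yet; when the next bracket
--     char turns out to be another open bracket, emit the constituent.
--     """
--     constituency = []
--     pending = None  # index of the last open bracket awaiting its next bracket char
--     for j, ch in enumerate(sentence):
--         if ch == brackets[0]:
--             if pending is not None:
--                 constituency.append(sentence[pending + 1 : j - 1])
--             pending = j
--         elif pending is not None:
--             if ch == brackets[1]:
--                 pending = None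
--     return constituency
-- ===== Notes on version B (the rewrite author's own statement) =====
-- stated objective: alternative
-- what changed: Replaced the nested scan (for every open bracket, rescan forward to the next bracket char) by a single left-to-right pass that keeps the index of the last unresolved open bracket and emits a constituent the moment the next bracket char is seen.
import Mathlib
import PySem

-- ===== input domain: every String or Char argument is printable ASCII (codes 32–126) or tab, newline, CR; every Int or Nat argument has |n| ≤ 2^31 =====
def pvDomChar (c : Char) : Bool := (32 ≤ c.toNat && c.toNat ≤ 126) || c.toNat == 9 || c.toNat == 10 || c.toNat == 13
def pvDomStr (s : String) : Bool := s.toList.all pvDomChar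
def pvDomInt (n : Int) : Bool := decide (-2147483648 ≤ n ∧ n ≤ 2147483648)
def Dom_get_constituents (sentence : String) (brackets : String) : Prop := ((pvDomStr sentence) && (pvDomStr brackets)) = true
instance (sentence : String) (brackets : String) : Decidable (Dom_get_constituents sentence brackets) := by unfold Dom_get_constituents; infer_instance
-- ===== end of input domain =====

-- B replaces A's nested forward rescans by one pass tracking the last unresolved
-- open bracket (single traversal instead of per-open rescans).


-- ===== PORT A =====
-- sentence[i+1 : j-1] (both Pythons contain this exact slice expression)
def pvConstit (cs : List Char) (i j : Int) : String :=
  String.ofList (PySem.List.slice cs (some (i + 1)) (some (j - 1)))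

-- inner 'for j in range(i+1, n)' loop of A, with its two breaks
-- (cs.getD j ' ' is sentence[j]: j is always in range here, so exact)
def pvInnerA (cs : List Char) (b0 b1 : Char) (i : Nat) (acc : List String) : List Nat → List String
  | [] => acc
  | j :: js =>
      if cs.getD j ' ' = b0 then acc ++ [pvConstit cs (i : Int) (j : Int)]
      else if cs.getD j ' ' = b1 then acc
      else pvInnerA cs b0 b1 i acc js

-- brackets[0] / brackets[1] are ported as getD 0/1 ' ': under Pre_, every access the
-- Python actually performs is in range, so the default is never the value used
def get_constituents (sentence : String) (brackets : String) : List String :=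
  (List.range sentence.toList.length).foldl (fun acc i =>
    if sentence.toList.getD i ' ' = brackets.toList.getD 0 ' ' then
      pvInnerA sentence.toList (brackets.toList.getD 0 ' ') (brackets.toList.getD 1 ' ') i acc
        (List.range' (i + 1) (sentence.toList.length - (i + 1)))
    else acc) []

-- ===== PORT B =====
-- the body of B's single 'for j, ch in enumerate(sentence)' loop
-- (brackets[1] is compared only inside the 'pending is not None' branch, as in Source B)
def pvStepB (cs : List Char) (b0 b1 : Char) (st : Option Int × List String) (jc : Int × Char) :
    Option Int × List String :=
  if jc.2 = b0 then
    (some jc.1,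
     match st.1 with
     | some i => st.2 ++ [pvConstit cs i jc.1]
     | none => st.2)
  else
    match st.1 with
    | some _ => if jc.2 = b1 then (none, st.2) else st
    | none => st

def get_constituents_alt (sentence : String) (brackets : String) : List String :=
  ((PySem.List.enumerate sentence.toList 0).foldl
    (pvStepB sentence.toList (brackets.toList.getD 0 ' ') (brackets.toList.getD 1 ' '))
    (none, [])).2

-- ===== PRECONDITION & SPEC =====
-- Pre_ is exactly the set of inputs on which A returns (and B returns too): it excludes
-- only inputs where Python raises IndexError on brackets[0]/brackets[1] — brackets
-- empty with a nonempty sentence, or a single-character brackets string whose bracket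
-- character occurs in the sentence immediately followed by a different character.
def Pre_get_constituents (sentence : String) (brackets : String) : Prop :=
  2 ≤ brackets.toList.length ∨
  (brackets.toList.length = 1 ∧
    ∀ i < sentence.toList.length - 1,
      sentence.toList.getD i ' ' = brackets.toList.getD 0 ' ' →
      sentence.toList.getD (i + 1) ' ' = brackets.toList.getD 0 ' ') ∨
  (brackets.toList.length = 0 ∧ sentence.toList.length = 0)
instance (sentence : String) (brackets : String) : Decidable (Pre_get_constituents sentence brackets) := by
  unfold Pre_get_constituents; infer_instance

def pvWitness_get_constituents : String × String := ("(a (b c)) (d)", "()")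

def Spec_get_constituents (sentence : String) (brackets : String) (out : List String) : Prop := out = get_constituents_alt sentence brackets
instance (sentence : String) (brackets : String) (out : List String) : Decidable (Spec_get_constituents sentence brackets out) := by unfold Spec_get_constituents; infer_instance

-- ===== CLAIM (what is proved, stated in full; the proofs are below) =====
def Claim_equal_get_constituents : Prop := ∀ (sentence : String) (brackets : String), Dom_get_constituents sentence brackets → Pre_get_constituents sentence brackets → Spec_get_constituents sentence brackets (get_constituents sentence brackets)

-- ===== LEMMAS AND PROOFS =====

-- Reference shape of A's answer: pvContrib i js resolves open bracket i by scanning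
-- the positions js; pvARef processes each position's own contribution in order.
def pvContrib (cs : List Char) (b0 b1 : Char) (i : Nat) : List Nat → List String
  | [] => []
  | j :: js =>
      if cs.getD j ' ' = b0 then [pvConstit cs (i : Int) (j : Int)]
      else if cs.getD j ' ' = b1 then []
      else pvContrib cs b0 b1 i js

def pvARef (cs : List Char) (b0 b1 : Char) : List Nat → List String
  | [] => []
  | i :: is =>
      (if cs.getD i ' ' = b0 then pvContrib cs b0 b1 i is else []) ++ pvARef cs b0 b1 is

-- Reference shape of B's answer: one pass with a pending open bracket.
def pvBRef (cs : List Char) (b0 b1 : Char) : Option Nat → List Nat → List String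
  | _, [] => []
  | p, j :: js =>
      if cs.getD j ' ' = b0 then
        (match p with | some i => [pvConstit cs (i : Int) (j : Int)] | none => []) ++
          pvBRef cs b0 b1 (some j) js
      else
        match p with
        | some _ => if cs.getD j ' ' = b1 then pvBRef cs b0 b1 none js else pvBRef cs b0 b1 p js
        | none => pvBRef cs b0 b1 none js

def pvOInt : Option Nat → Option Int
  | some i => some (i : Int)
  | none => none

theorem pvInnerA_eq (cs : List Char) (b0 b1 : Char) (i : Nat) :
    ∀ (js : List Nat) (acc : List String),
      pvInnerA cs b0 b1 i acc js = acc ++ pvContrib cs b0 b1 i js := by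
  intro js
  induction js with
  | nil => intro acc; simp [pvInnerA, pvContrib]
  | cons j js ih =>
      intro acc
      simp only [pvInnerA, pvContrib]
      split_ifs with h1 h2 <;> simp [ih]

theorem pvAFold_eq (cs : List Char) (b0 b1 : Char) (n : Nat) (hn : n = cs.length) :
    ∀ (m k : Nat) (acc : List String), k + m = n →
      (List.range' k m).foldl (fun acc i =>
          if cs.getD i ' ' = b0 then pvInnerA cs b0 b1 i acc (List.range' (i + 1) (n - (i + 1)))
          else acc) acc
        = acc ++ pvARef cs b0 b1 (List.range' k m) := by
  intro m
  induction m with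
  | zero => intro k acc _; simp [pvARef]
  | succ m ih =>
      intro k acc hk
      rw [List.range'_succ]
      simp only [List.foldl_cons, pvARef]
      have htail : n - (k + 1) = m := by omega
      split_ifs with h
      · rw [htail, pvInnerA_eq, ih (k + 1) _ (by omega)]
        simp
      · rw [ih (k + 1) _ (by omega)]
        simp

-- The heart of the equivalence: B's single pass produces A's per-open contributions.
theorem pvBRef_eq_pvARef (cs : List Char) (b0 b1 : Char) :
    ∀ (js : List Nat) (p : Option Nat),
      pvBRef cs b0 b1 p js
        = (match p with | some i => pvContrib cs b0 b1 i js | none => []) ++ pvARef cs b0 b1 js := by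
  intro js
  induction js with
  | nil => intro p; cases p <;> simp [pvBRef, pvARef, pvContrib]
  | cons j js ih =>
      intro p
      simp only [pvBRef, pvARef, pvContrib]
      split_ifs with h1 h2 <;> cases p <;> simp [ih]

theorem pvBFold_eq (cs : List Char) (b0 b1 : Char) :
    ∀ (suffix : List Char) (k : Nat) (p : Option Nat) (acc : List String),
      cs.drop k = suffix →
      ((PySem.List.enumerate suffix (k : Int)).foldl (pvStepB cs b0 b1) (pvOInt p, acc)).2
        = acc ++ pvBRef cs b0 b1 p (List.range' k suffix.length) := by
  intro suffix
  induction suffix with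
  | nil => intro k p acc _; simp [PySem.List.enumerate_nil, pvBRef]
  | cons c rest ih =>
      intro k p acc hdrop
      have hc : cs.getD k ' ' = c := by
        have h : cs[k]? = some c := by
          rw [← List.head?_drop, hdrop]; rfl
        simp [List.getD, h]
      have hrest : cs.drop (k + 1) = rest := by
        rw [← List.tail_drop, hdrop]; rfl
      have hk1 : ((k : Int) + 1) = ((k + 1 : Nat) : Int) := by push_cast; ring
      rw [PySem.List.enumerate_cons, hk1]
      simp only [List.foldl_cons, List.length_cons, List.range'_succ, pvBRef, hc, pvStepB]
      split_ifs with h1 h2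
      · cases p with
        | none =>
            have := ih (k + 1) (some k) acc hrest
            simp only [pvOInt] at this ⊢
            rw [this]
            simp
        | some i =>
            have := ih (k + 1) (some k) (acc ++ [pvConstit cs (i : Int) (k : Int)]) hrest
            simp only [pvOInt] at this ⊢
            rw [this]
            simp
      · cases p with
        | none =>
            have := ih (k + 1) none acc hrest
            simp only [pvOInt] at this ⊢
            rw [this]
        | some i =>
            have := ih (k + 1) none acc hrest
            simp only [pvOInt] at this ⊢
            rw [this]
      · cases p with
        | none =>
            have := ih (k + 1) none acc hrest
            simp only [pvOInt] at this ⊢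
            rw [this]
        | some i =>
            have := ih (k + 1) (some i) acc hrest
            simp only [pvOInt] at this ⊢
            exact this

theorem get_constituents_eq_ref (sentence brackets : String) :
    get_constituents sentence brackets
      = pvARef sentence.toList (brackets.toList.getD 0 ' ') (brackets.toList.getD 1 ' ')
          (List.range' 0 sentence.toList.length) := by
  unfold get_constituents
  rw [List.range_eq_range']
  rw [pvAFold_eq _ _ _ _ rfl _ 0 [] (by omega)]
  simp

theorem get_constituents_alt_eq_ref (sentence brackets : String) :
    get_constituents_alt sentence brackets
      = pvBRef sentence.toList (brackets.toList.getD 0 ' ') (brackets.toList.getD 1 ' ')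
          none (List.range' 0 sentence.toList.length) := by
  unfold get_constituents_alt
  have h := pvBFold_eq sentence.toList (brackets.toList.getD 0 ' ') (brackets.toList.getD 1 ' ')
    sentence.toList 0 none [] (by simp)
  simp only [pvOInt, Nat.cast_zero] at h
  simpa using h

-- ===== VERDICT (by name: the statement is the Claim_ definition above) =====
theorem get_constituents_spec : Claim_equal_get_constituents := by
  intro sentence brackets _ _
  unfold Spec_get_constituents
  rw [get_constituents_eq_ref, get_constituents_alt_eq_ref, pvBRef_eq_pvARef]
  simp
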